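-- pv_equiv track=rewrite | github.com/benbendaisy/CommunicationCodes | python_module/examples/2551_Put_Marbles_in_Bags.py | putMarbles3
-- ===== SOURCE A (Python) =====
-- from typing import List
--
-- def putMarbles3(weights: List[int], k: int) -> int:
--     n = len(weights)
--     if k == 1:
--         return 0  # Only one way to partition, so min and max scores are the same.
--
--     # Compute pairwise sums of consecutive elements
--     pair_sums = [weights[i] + weights[i + 1] for i in range(n - 1)]
--
--     # Sort the pair sums to determine best and worst partitions
--     pair_sums.sort()
--
--     # The min score uses the smallest (k-1) pairs, max score uses the largest (k-1) pairs
--     min_score = sum(pair_sums[:k-1])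
--     max_score = sum(pair_sums[-(k-1):])
--
--     return max_score - min_score
-- ===== SOURCE B (Python) =====
-- from typing import List
--
--
-- def _bounded_insert(buf: List[int], s: int, m: int, descending: bool) -> List[int]:
--     # insert s into the ordered buffer buf, then truncate it back to at most m entries
--     i = 0
--     if descending:
--         while i < len(buf) and buf[i] >= s:
--             i += 1
--     else:
--         while i < len(buf) and buf[i] <= s:
--             i += 1
--     buf = buf[:i] + [s] + buf[i:]
--     return buf[:m] if len(buf) > m else buf
--
--
-- def putMarbles3(weights: List[int], k: int) -> int:
--     if k == 1:
--         return 0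
--     m = k - 1
--     low: List[int] = []   # the m smallest pair sums seen so far, ascending
--     high: List[int] = []  # the m largest pair sums seen so far, descending
--     for a, b in zip(weights, weights[1:]):
--         s = a + b
--         low = _bounded_insert(low, s, m, False)
--         high = _bounded_insert(high, s, m, True)
--     return sum(high) - sum(low)
-- ===== Notes on version B (the rewrite author's own statement) =====
-- stated objective: alternative
-- what changed: B replaces A's build-all-pair-sums-then-global-sort with a single streaming pass that maintains two bounded ordered buffers holding only the k-1 smallest and k-1 largest consecutive pair sums, so no full sort of the n-1 sums is ever performed.
-- outside the precondition, e.g. on putMarbles3([1, 5, 2], 0): A returns 1, B returns 0; on putMarbles3([1, 5, 2, 9], -1): A returns 5, B returns 0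
import Mathlib
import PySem

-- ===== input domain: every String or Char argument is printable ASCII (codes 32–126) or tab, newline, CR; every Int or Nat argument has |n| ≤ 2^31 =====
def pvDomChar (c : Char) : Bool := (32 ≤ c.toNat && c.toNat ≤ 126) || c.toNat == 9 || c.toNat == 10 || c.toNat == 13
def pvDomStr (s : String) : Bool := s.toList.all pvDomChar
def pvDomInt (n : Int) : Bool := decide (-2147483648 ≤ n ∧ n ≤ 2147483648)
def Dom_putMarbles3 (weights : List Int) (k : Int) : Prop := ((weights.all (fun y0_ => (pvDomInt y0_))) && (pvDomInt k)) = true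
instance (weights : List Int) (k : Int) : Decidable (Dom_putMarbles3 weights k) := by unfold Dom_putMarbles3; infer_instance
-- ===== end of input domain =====

-- B replaces A's global sort of all consecutive pair sums by one streaming pass keeping two
-- bounded ordered buffers of the k-1 smallest / k-1 largest sums (objective: alternative).

-- ===== PORT A =====
def putMarbles3 (weights : List Int) (k : Int) : Int :=
  let n : Int := weights.length
  if k = 1 then 0
  else
    -- indices i and i+1 produced by range(n-1) are always in range, so the default of pyGetD is never used
    let pairSums := (PySem.List.pyRange 0 (n - 1) 1).map
      (fun i => PySem.List.pyGetD weights i 0 + PySem.List.pyGetD weights (i + 1) 0)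
    let sortedPs := PySem.List.sorted pairSums (fun x => x)
    let minScore := (PySem.List.slice sortedPs none (some (k - 1))).sum
    let maxScore := (PySem.List.slice sortedPs (some (-(k - 1))) none).sum
    maxScore - minScore

-- ===== PORT B =====
-- _bounded_insert of Source B: ordered insertion (PySem.List.insertBy) followed by truncation to m entries
def putMarbles3_alt (weights : List Int) (k : Int) : Int :=
  if k = 1 then 0
  else
    let m := (k - 1).toNat
    let res := (weights.zip weights.tail).foldl
      (fun st p =>
        let s := p.1 + p.2
        ((PySem.List.insertBy (fun a b => decide (a < b)) s st.1).take m,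
         (PySem.List.insertBy (fun a b => decide (b < a)) s st.2).take m))
      ([], [])
    res.2.sum - res.1.sum

-- ===== PRECONDITION & SPEC =====
-- Pre_ restricts to the problem's natural domain of at least one bag, k ≥ 1: for k ≤ 0 A's value is
-- an artefact of Python's negative-slice arithmetic, outside the task's meaning (cites in claim.json).
def Pre_putMarbles3 (weights : List Int) (k : Int) : Prop := 1 ≤ k
instance (weights : List Int) (k : Int) : Decidable (Pre_putMarbles3 weights k) := by unfold Pre_putMarbles3; infer_instance
def pvWitness_putMarbles3 : List Int × Int := ([1, 2, 3], 2)

def Spec_putMarbles3 (weights : List Int) (k : Int) (out : Int) : Prop := out = putMarbles3_alt weights k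
instance (weights : List Int) (k : Int) (out : Int) : Decidable (Spec_putMarbles3 weights k out) := by unfold Spec_putMarbles3; infer_instance

-- ===== CLAIM (what is proved, stated in full; the proofs are below) =====
def Claim_equal_putMarbles3 : Prop := ∀ (weights : List Int) (k : Int), Dom_putMarbles3 weights k → Pre_putMarbles3 weights k → Spec_putMarbles3 weights k (putMarbles3 weights k)

-- ===== LEMMAS AND PROOFS =====

-- A's comprehension over range(n-1) builds exactly the consecutive pair sums, i.e. zipWith (+) w w.tail
lemma pv_pairs_eq_range (w : List Int) :
    (List.range (w.length - 1)).map (fun j => w.getD j 0 + w.getD (j + 1) 0)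
      = List.zipWith (· + ·) w w.tail := by
  induction w with
  | nil => rfl
  | cons a t ih =>
    cases t with
    | nil => rfl
    | cons b t' =>
      have h : (a :: b :: t').length - 1 = ((b :: t').length - 1) + 1 := by
        simp
      rw [h, List.range_succ_eq_map, List.map_cons, List.map_map]
      rw [List.tail_cons, List.zipWith_cons_cons]
      simp only [List.getD_cons_zero, List.getD_cons_succ]
      -- congr closes the tail goal with ih (up to (b :: t').tail ≡ t')
      congr 1

lemma pv_pairs_eq (w : List Int) :
    (PySem.List.pyRange 0 ((w.length : Int) - 1) 1).map
        (fun i => PySem.List.pyGetD w i 0 + PySem.List.pyGetD w (i + 1) 0)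
      = List.zipWith (· + ·) w w.tail := by
  rw [PySem.List.pyRange_one, List.map_map]
  have hlen : (((w.length : Int) - 1) - 0).toNat = w.length - 1 := by omega
  rw [hlen]
  rw [← pv_pairs_eq_range w]
  apply List.map_congr_left
  intro j _
  simp only [Function.comp, zero_add]
  have h1 : (j : Int) + 1 = ((j + 1 : Nat) : Int) := by push_cast; ring
  rw [PySem.List.pyGetD_natCast, h1, PySem.List.pyGetD_natCast]

-- truncating the buffer before an ordered insertion loses nothing the truncation after it keeps
lemma pv_take_insertBy (before : Int → Int → Bool) (s : Int) :
    ∀ (l : List Int) (m : Nat),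
      (PySem.List.insertBy before s (l.take m)).take m
        = (PySem.List.insertBy before s l).take m := by
  intro l
  induction l with
  | nil => intro m; simp
  | cons h t ih =>
    intro m
    cases m with
    | zero => simp
    | succ m' =>
      rw [List.take_succ_cons]
      simp only [PySem.List.insertBy]
      by_cases hb : before s h = true
      · simp only [hb, if_true, List.take_succ_cons]
        cases m' with
        | zero => simp
        | succ p =>
          rw [List.take_succ_cons, List.take_succ_cons, List.take_take,
            Nat.min_eq_left (Nat.le_succ p)]
      · simp only [hb, Bool.false_eq_true, if_false, List.take_succ_cons]
        rw [ih m']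

-- loop invariant: folding "insert then truncate to m" equals truncating the full insertion-sort fold
lemma pv_foldl_bounded (before : Int → Int → Bool) (m : Nat) :
    ∀ (ps L : List Int),
      ps.foldl (fun buf s => (PySem.List.insertBy before s buf).take m) (L.take m)
        = (ps.foldl (fun acc s => PySem.List.insertBy before s acc) L).take m := by
  intro ps
  induction ps with
  | nil => intro L; rfl
  | cons s ps' ih =>
    intro L
    simp only [List.foldl_cons]
    rw [pv_take_insertBy, ih]

-- a pair-state fold splits into two independent folds
lemma pv_foldl_split (f g : List Int → Int → List Int) :
    ∀ (xs : List Int) (l1 l2 : List Int),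
      xs.foldl (fun st s => (f st.1 s, g st.2 s)) (l1, l2)
        = (xs.foldl f l1, xs.foldl g l2) := by
  intro xs
  induction xs with
  | nil => intro l1 l2; rfl
  | cons x xs' ih => intro l1 l2; simp only [List.foldl_cons]; exact ih _ _

-- folding over zip with the sum of each pair = folding over zipWith (+)
lemma pv_foldl_zip {β : Type} (F : β → Int → β) :
    ∀ (u v : List Int) (init : β),
      (u.zip v).foldl (fun st p => F st (p.1 + p.2)) init
        = (List.zipWith (· + ·) u v).foldl F init := by
  intro u
  induction u with
  | nil => intro v init; rfl
  | cons a u' ih =>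
    intro v init
    cases v with
    | nil => rfl
    | cons b v' => simp only [List.zip_cons_cons, List.zipWith_cons_cons, List.foldl_cons]; exact ih v' _

-- Python's sorted(reverse=True) on ints is the reverse of sorted()
lemma pv_sorted_rev_eq_reverse (ps : List Int) :
    PySem.List.sorted ps (fun x => x) true = (PySem.List.sorted ps (fun x => x)).reverse := by
  exact List.Perm.eq_of_pairwise
    (fun a b _ _ h1 h2 => le_antisymm h2 h1)
    (PySem.List.sorted_pairwise_rev ps (fun x => x))
    ((List.pairwise_reverse).2 (PySem.List.sorted_pairwise ps (fun x => x)))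
    ((PySem.List.sorted_perm ps (fun x => x) true).trans
      ((PySem.List.sorted_perm ps (fun x => x) false).symm.trans (List.reverse_perm _).symm))

-- ===== VERDICT (by name: the statement is the Claim_ definition above) =====
theorem putMarbles3_spec : Claim_equal_putMarbles3 := by
  intro w k _ hpre
  unfold Spec_putMarbles3 putMarbles3 putMarbles3_alt
  by_cases hk1 : k = 1
  · simp [hk1]
  · have hk : 2 ≤ k := by
      have h1 : (1 : Int) ≤ k := hpre
      omega
    simp only [if_neg hk1]
    set ps := List.zipWith (· + ·) w w.tail with hps
    set m := (k - 1).toNat with hm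
    have hm1 : 1 ≤ m := by omega
    have hkm : (m : Int) = k - 1 := by omega
    -- B side: split the fold and rewrite each component as a truncated insertion sort
    rw [pv_foldl_zip (fun st s =>
          ((PySem.List.insertBy (fun a b => decide (a < b)) s st.1).take m,
           (PySem.List.insertBy (fun a b => decide (b < a)) s st.2).take m)) w w.tail ([], [])]
    rw [pv_foldl_split
          (fun buf s => (PySem.List.insertBy (fun a b => decide (a < b)) s buf).take m)
          (fun buf s => (PySem.List.insertBy (fun a b => decide (b < a)) s buf).take m)
          ps [] []]
    have hlow : ps.foldl (fun buf s => (PySem.List.insertBy (fun a b => decide (a < b)) s buf).take m) ([] : List Int)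
        = (PySem.List.sorted ps (fun x => x)).take m := by
      have h := pv_foldl_bounded (fun a b => decide (a < b)) m ps []
      simpa [PySem.List.sorted_eq_foldl_insertBy ps (fun x => x)] using h
    have hhigh : ps.foldl (fun buf s => (PySem.List.insertBy (fun a b => decide (b < a)) s buf).take m) ([] : List Int)
        = (PySem.List.sorted ps (fun x => x) true).take m := by
      have h := pv_foldl_bounded (fun a b => decide (b < a)) m ps []
      simpa [PySem.List.sorted_rev_eq_foldl_insertBy ps (fun x => x)] using h
    rw [hlow, hhigh]
    -- A side: the comprehension is ps, the slices are take/drop of the sorted list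
    rw [pv_pairs_eq w, ← hps]
    set S := PySem.List.sorted ps (fun x => x) with hS
    have hmin : PySem.List.slice S none (some (k - 1)) = S.take m := by
      rw [PySem.List.slice_to S (by omega : (0:Int) ≤ k - 1)]
    have hmax : PySem.List.slice S (some (-(k - 1))) none = S.drop (S.length - m) := by
      rw [PySem.List.slice_some_none, ← hkm,
        PySem.List.clampIdx_neg_natCast S.length m hm1]
    rw [hmin, hmax, pv_sorted_rev_eq_reverse, ← hS]
    simp [List.take_reverse, List.sum_reverse]
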